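-- pv_equiv track=rewrite | github.com/Hin1209/for-coding-test | Greedy/Greedy_problem6.py | solution
-- ===== SOURCE A (Python) =====
-- def solution(food_times, k):
--     answer = 0
--     sum_food = sum(food_times)
--
--     while (k != 0):
--         if (k > sum(food_times)):
--             answer = -1
--             break
--         for i in range(len(food_times)):
--             if (food_times[i] != 0):
--                 k -= 1
--                 if (k == 0):
--                     answer = i + 2
--                     if (i == len(food_times) - 1):
--                         answer = 1
--                     break
--                 food_times[i] -= 1
--
--     return answer
-- ===== SOURCE B (Python) =====
-- def solution(food_times, k):
--     n = len(food_times)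
--     if k == 0:
--         return 0
--     if k > sum(food_times):
--         return -1
--     items = [(v, i) for i, v in enumerate(food_times) if v > 0]
--     while True:
--         c = len(items)
--         m = min(v for v, _ in items)
--         if k > m * c:
--             k -= m * c
--             items = [(v - m, i) for v, i in items if v > m]
--         else:
--             idx = items[(k - 1) % c][1]
--             return (idx + 1) % n + 1
-- ===== Notes on version B (the rewrite author's own statement) =====
-- stated objective: alternative
-- what changed: A simulates the round-robin one bite at a time (k iterations); B jumps whole levels at once: it repeatedly subtracts min*count from k to skip all full rounds at the current minimum food time, then picks the k-th bite by index arithmetic ((k-1) mod count) over the surviving foods.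
-- outside the precondition, e.g. on solution([-1, 3], 1): A returns 2, B returns 1
import Mathlib
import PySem

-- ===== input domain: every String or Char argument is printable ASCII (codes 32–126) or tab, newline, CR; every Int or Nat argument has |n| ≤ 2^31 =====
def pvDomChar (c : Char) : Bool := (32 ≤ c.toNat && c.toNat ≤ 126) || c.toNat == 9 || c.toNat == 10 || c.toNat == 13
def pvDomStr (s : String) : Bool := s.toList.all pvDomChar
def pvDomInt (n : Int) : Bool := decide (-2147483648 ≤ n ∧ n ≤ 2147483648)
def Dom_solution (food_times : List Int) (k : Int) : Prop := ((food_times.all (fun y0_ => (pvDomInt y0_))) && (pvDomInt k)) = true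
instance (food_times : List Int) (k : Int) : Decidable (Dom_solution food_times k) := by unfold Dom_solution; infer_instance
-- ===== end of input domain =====

-- B replaces A's one-bite-at-a-time simulation by level jumps (skip min*count bites at once);
-- equivalence is about the RETURN value only (Python A mutates food_times in place, B does not).

-- ===== PORT A =====
-- one pass of A's inner `for i in range(len(food_times))`; n is the (constant) list length,
-- i the absolute index of the head; returns .inl (updated list, updated k) when the for
-- completes, .inr answer when A breaks with k == 0
def aPass (n : Nat) : List Int → Int → Nat → (List Int × Int) ⊕ Int
  | [], k, _ => Sum.inl ([], k)
  | v :: rest, k, i =>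
    if v ≠ 0 then
      if k - 1 = 0 then Sum.inr (if i = n - 1 then (1 : Int) else (i : Int) + 2)
      else
        match aPass n rest (k - 1) (i + 1) with
        | Sum.inl (rest', k') => Sum.inl ((v - 1) :: rest', k')
        | Sum.inr a => Sum.inr a
    else
      match aPass n rest k (i + 1) with
      | Sum.inl (rest', k') => Sum.inl (v :: rest', k')
      | Sum.inr a => Sum.inr a

-- A's `while (k != 0)` loop; fuel only makes it total (Python diverges for k < 0):
-- inside Pre_ each pass strictly decreases k, so k.toNat + 1 passes always suffice
def aLoop : Nat → List Int → Int → Int → Int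
  | 0, _, _, answer => answer
  | fuel + 1, fts, k, answer =>
    if k = 0 then answer
    else if fts.sum < k then -1            -- `if (k > sum(food_times)): answer = -1; break`
    else
      match aPass fts.length fts k 0 with
      | Sum.inl (fts', k') => aLoop fuel fts' k' answer
      | Sum.inr ans => ans                 -- break with k == 0: while exits, returns answer

def solution (food_times : List Int) (k : Int) : Int :=
  aLoop (k.toNat + 1) food_times k 0

-- ===== PORT B =====
-- [(v, i) for i, v in enumerate(food_times) if v > 0]
def itemsOf (l : List Int) : List (Int × Int) :=
  ((PySem.List.enumerate l 0).filter (fun p => decide (0 < p.2))).map (fun p => (p.2, p.1))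

-- Source B's `while True` loop; fuel only makes it total (k decreases by at least 1 per
-- iteration, so k.toNat iterations suffice inside Pre_)
def bLoop : Nat → Int → List (Int × Int) → Int → Int
  | 0, _, _, _ => 0                                   -- fuel exhausted: unreachable under Pre_
  | fuel + 1, n, items, k =>
    let c : Int := items.length
    match PySem.List.min? (items.map Prod.fst) (fun v => v) with
    | none => 0                                       -- Python min() raises here; unreachable under Pre_
    | some m =>
      if m * c < k then
        bLoop fuel n ((items.filter (fun p => decide (m < p.1))).map (fun p => (p.1 - m, p.2))) (k - m * c)
      else
        PySem.Int.mod ((items.getD (PySem.Int.mod (k - 1) c).toNat (0, 0)).2 + 1) n + 1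

def solution_alt (food_times : List Int) (k : Int) : Int :=
  let n : Int := food_times.length
  if k = 0 then 0
  else if food_times.sum < k then -1
  else bLoop k.toNat n (itemsOf food_times) k

-- ===== PRECONDITION & SPEC =====
-- Pre_ restricts to the problem's natural domain (food times are nonnegative, k is a
-- nonnegative number of seconds): for k < 0 Python A loops forever (or astronomically long),
-- and negative food times are "eaten" indefinitely by A, which is outside the task's meaning.
def Pre_solution (food_times : List Int) (k : Int) : Prop :=
  0 ≤ k ∧ ∀ v ∈ food_times, 0 ≤ v
instance (food_times : List Int) (k : Int) : Decidable (Pre_solution food_times k) := by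
  unfold Pre_solution; infer_instance

def pvWitness_solution : List Int × Int := ([3, 1, 2], 5)

def Spec_solution (food_times : List Int) (k : Int) (out : Int) : Prop := out = solution_alt food_times k
instance (food_times : List Int) (k : Int) (out : Int) : Decidable (Spec_solution food_times k out) := by unfold Spec_solution; infer_instance

-- ===== CLAIM (what is proved, stated in full; the proofs are below) =====
def Claim_equal_solution : Prop := ∀ (food_times : List Int) (k : Int), Dom_solution food_times k → Pre_solution food_times k → Spec_solution food_times k (solution food_times k)

-- ===== LEMMAS AND PROOFS =====

-- number of nonzero entries (the bites A takes in one full pass)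
def cnz : List Int → Nat
  | [] => 0
  | v :: r => (if v ≠ 0 then 1 else 0) + cnz r

-- positions of the nonzero entries, in order
def nzIdx : List Int → List Nat
  | [] => []
  | v :: r => if v ≠ 0 then 0 :: (nzIdx r).map (· + 1) else (nzIdx r).map (· + 1)

-- subtract j from every nonzero entry (the list after j full passes of A, while no entry crosses 0)
def subl (j : Int) (l : List Int) : List Int := l.map (fun v => if v = 0 then v else v - j)

-- A's answer formula for a break at absolute index i
def mkAns (n : Nat) (i : Nat) : Int := if i = n - 1 then 1 else (i : Int) + 2

theorem length_nzIdx (l : List Int) : (nzIdx l).length = cnz l := by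
  induction l with
  | nil => simp [nzIdx, cnz]
  | cons v r ih => by_cases h : v = 0 <;> simp [nzIdx, cnz, h, ih] <;> omega

theorem mem_nzIdx_lt (l : List Int) {i : Nat} (h : i ∈ nzIdx l) : i < l.length := by
  induction l generalizing i with
  | nil => simp [nzIdx] at h
  | cons v r ih =>
    by_cases hv : v = 0 <;> simp [nzIdx, hv] at h
    · obtain ⟨j, hj, rfl⟩ := h
      have := ih hj; simp; omega
    · rcases h with rfl | ⟨j, hj, rfl⟩
      · simp
      · have := ih hj; simp; omega

theorem getD_nzIdx_ne (l : List Int) {i : Nat} (h : i ∈ nzIdx l) : l.getD i 0 ≠ 0 := by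
  induction l generalizing i with
  | nil => simp [nzIdx] at h
  | cons v r ih =>
    by_cases hv : v = 0 <;> simp [nzIdx, hv] at h
    · obtain ⟨j, hj, rfl⟩ := h
      simpa using ih hj
    · rcases h with rfl | ⟨j, hj, rfl⟩
      · simpa using hv
      · simpa using ih hj

theorem getD_map_add_one (xs : List Nat) (t : Nat) (ht : t < xs.length) :
    (xs.map (· + 1)).getD t 0 = xs.getD t 0 + 1 := by
  rw [List.getD_eq_getElem?_getD, List.getD_eq_getElem?_getD, List.getElem?_map,
    List.getElem?_eq_getElem ht]
  simp

theorem mem_vals (l : List Int) (v : Int) (hmem : v ∈ l) (hne : v ≠ 0) :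
    v ∈ (nzIdx l).map (fun i => l.getD i 0) := by
  induction l with
  | nil => simp at hmem
  | cons w r ih =>
    have hshift : ((nzIdx r).map (· + 1)).map (fun i => (w :: r).getD i 0) =
        (nzIdx r).map (fun i => r.getD i 0) := by
      rw [List.map_map]; apply List.map_congr_left; intro a _; simp
    rcases List.mem_cons.mp hmem with rfl | hmr
    · simp [nzIdx, hne]
    · have hm := ih hmr
      by_cases hw : w = 0
      · simp only [nzIdx, if_neg (show ¬ w ≠ 0 by simp [hw])]
        rw [hshift]; exact hm
      · simp only [nzIdx, if_pos hw, List.map_cons]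
        rw [hshift]; exact List.mem_cons_of_mem _ hm

theorem pass_inl (l : List Int) (n : Nat) (k : Int) (i : Nat) (h : (cnz l : Int) < k) :
    aPass n l k i = Sum.inl (l.map (fun v => if v ≠ 0 then v - 1 else v), k - cnz l) := by
  induction l generalizing k i with
  | nil => simp [aPass, cnz]
  | cons v r ih =>
    by_cases hv : v = 0
    · have h' : (cnz r : Int) < k := by
        simp only [cnz, hv] at h; simpa using h
      simp only [aPass, if_neg (show ¬ v ≠ 0 by simp [hv]), ih k (i + 1) h']
      simp [cnz, hv]
    · have h1 : (1 : Int) + (cnz r : Int) < k := by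
        simp only [cnz, if_pos hv] at h; push_cast at h; omega
      have h' : (cnz r : Int) < k - 1 := by omega
      simp only [aPass, if_pos hv, if_neg (show ¬ (k - 1 = 0) by omega), ih (k - 1) (i + 1) h']
      simp only [cnz, if_pos hv, List.map_cons]
      have : k - 1 - (cnz r : Int) = k - ((1 + cnz r : Nat) : Int) := by push_cast; omega
      rw [this]

theorem pass_inr (l : List Int) (n : Nat) (k : Int) (i : Nat) (h1 : 1 ≤ k) (h2 : k ≤ (cnz l : Int)) :
    aPass n l k i = Sum.inr (mkAns n (i + (nzIdx l).getD (k.toNat - 1) 0)) := by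
  induction l generalizing k i with
  | nil => simp only [cnz, Nat.cast_zero] at h2; omega
  | cons v r ih =>
    by_cases hv : v = 0
    · have h2' : k ≤ (cnz r : Int) := by simpa [cnz, hv] using h2
      have hcr : 1 ≤ cnz r := by omega
      simp only [aPass, if_neg (show ¬ v ≠ 0 by simp [hv]), ih k (i + 1) h1 h2']
      simp only [nzIdx, if_neg (show ¬ v ≠ 0 by simp [hv])]
      rw [getD_map_add_one _ _ (by rw [length_nzIdx]; omega)]
      have harg : i + ((nzIdx r).getD (k.toNat - 1) 0 + 1) =
          i + 1 + (nzIdx r).getD (k.toNat - 1) 0 := by omega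
      rw [harg]
    · by_cases hk1 : k = 1
      · subst hk1
        simp [aPass, hv, mkAns, nzIdx]
      · have h2' : k - 1 ≤ (cnz r : Int) := by
          simp only [cnz, if_pos hv] at h2; push_cast at h2; omega
        have hcr : k.toNat - 2 < cnz r := by omega
        simp only [aPass, if_pos hv, if_neg (show ¬ (k - 1 = 0) by omega),
          ih (k - 1) (i + 1) (by omega) h2']
        simp only [nzIdx, if_pos hv]
        rw [show k.toNat - 1 = (k.toNat - 2) + 1 by omega, List.getD_cons_succ,
          getD_map_add_one _ _ (by rw [length_nzIdx]; omega),
          show (k - 1).toNat - 1 = k.toNat - 2 by omega]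
        have harg : i + ((nzIdx r).getD (k.toNat - 2) 0 + 1) =
            i + 1 + (nzIdx r).getD (k.toNat - 2) 0 := by omega
        rw [harg]

theorem sum_subl (j : Int) (l : List Int) : (subl j l).sum = l.sum - j * cnz l := by
  induction l with
  | nil => simp [subl, cnz]
  | cons v r ih =>
    by_cases h : v = 0 <;> (simp [subl, cnz, h] at ih ⊢; push_cast; rw [ih]; try ring) <;> ring

theorem length_subl (j : Int) (l : List Int) : (subl j l).length = l.length := by
  simp [subl]

theorem cnz_subl (j : Int) (l : List Int) (h : ∀ v ∈ l, v ≠ 0 → j < v) : cnz (subl j l) = cnz l := by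
  induction l with
  | nil => rfl
  | cons v r ih =>
    have hr := ih (fun w hw => h w (List.mem_cons_of_mem _ hw))
    by_cases hv : v = 0
    · simp [subl, cnz, hv] at hr ⊢; exact hr
    · have := h v (List.mem_cons_self ..) hv
      simp only [subl, cnz, List.map_cons] at hr ⊢
      rw [if_neg hv, if_pos (show v - j ≠ 0 by omega), if_pos hv]
      omega

theorem nzIdx_subl (j : Int) (l : List Int) (h : ∀ v ∈ l, v ≠ 0 → j < v) : nzIdx (subl j l) = nzIdx l := by
  induction l with
  | nil => rfl
  | cons v r ih =>
    have hr := ih (fun w hw => h w (List.mem_cons_of_mem _ hw))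
    by_cases hv : v = 0
    · subst hv
      simp only [subl, List.map_cons, nzIdx] at hr ⊢
      simp [hr]
    · have := h v (List.mem_cons_self ..) hv
      simp only [subl, List.map_cons, nzIdx] at hr ⊢
      rw [if_neg hv, if_pos (show v - j ≠ 0 by omega), if_pos hv]
      rw [hr]

theorem map_dec_subl (j : Int) (l : List Int) (h : ∀ v ∈ l, v ≠ 0 → j + 1 ≤ v) :
    (subl j l).map (fun v => if v ≠ 0 then v - 1 else v) = subl (j + 1) l := by
  induction l with
  | nil => rfl
  | cons v r ih =>
    have hr := ih (fun w hw => h w (List.mem_cons_of_mem _ hw))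
    by_cases hv : v = 0
    · subst hv
      simp only [subl, List.map_cons] at hr ⊢
      rw [hr]; norm_num
    · have := h v (List.mem_cons_self ..) hv
      simp only [subl, List.map_cons] at hr ⊢
      rw [if_neg hv, if_pos (show v - j ≠ 0 by omega)]
      rw [hr]
      refine congrArg₂ _ (by omega) rfl

theorem subl_zero (l : List Int) : subl 0 l = l := by
  have h : ∀ v : Int, (if v = 0 then v else v - 0) = v := by intro v; split <;> omega
  simp only [subl, h, List.map_id']

theorem nonneg_subl (j : Int) (l : List Int) (h0 : ∀ v ∈ l, 0 ≤ v) (h : ∀ v ∈ l, v ≠ 0 → j ≤ v) :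
    ∀ v ∈ subl j l, 0 ≤ v := by
  intro v hv
  simp only [subl, List.mem_map] at hv
  obtain ⟨w, hw, rfl⟩ := hv
  by_cases hw0 : w = 0
  · simp [hw0]
  · have := h w hw hw0; have := h0 w hw; rw [if_neg hw0]; omega

theorem cnz_pos_of_sum (l : List Int) (h0 : ∀ v ∈ l, 0 ≤ v) (h : 1 ≤ l.sum) : 1 ≤ cnz l := by
  induction l with
  | nil => simp at h
  | cons v r ih =>
    by_cases hv : v = 0
    · subst hv
      simp only [List.sum_cons, zero_add] at h
      have := ih (fun w hw => h0 w (List.mem_cons_of_mem _ hw)) h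
      simp [cnz]; omega
    · simp [cnz, hv]

theorem nzIdx_subl_filter (m : Int) (l : List Int) (h0 : ∀ v ∈ l, 0 ≤ v)
    (h : ∀ v ∈ l, v ≠ 0 → m ≤ v) :
    nzIdx (subl m l) = (nzIdx l).filter (fun i => decide (m < l.getD i 0)) := by
  induction l with
  | nil => rfl
  | cons v r ih =>
    have hr := ih (fun w hw => h0 w (List.mem_cons_of_mem _ hw))
      (fun w hw => h w (List.mem_cons_of_mem _ hw))
    have hfm : ∀ (xs : List Nat),
        (xs.map (· + 1)).filter (fun i => decide (m < (v :: r).getD i 0)) =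
          (xs.filter (fun i => decide (m < r.getD i 0))).map (· + 1) := by
      intro xs
      rw [List.filter_map]
      congr 1
    by_cases hv : v = 0
    · subst hv
      simp only [subl, List.map_cons, nzIdx,
        if_neg (show ¬ ((0:Int) ≠ 0) by simp)]
      simp only [subl] at hr
      rw [hr, hfm]
      simp
    · have hmv : m ≤ v := h v (List.mem_cons_self ..) hv
      by_cases hvm : v = m
      · simp only [subl, List.map_cons, if_neg hv, nzIdx,
          if_neg (show ¬ (v - m ≠ 0) by omega), if_pos hv, List.filter_cons]
        rw [if_neg (by simp; omega)]
        simp only [subl] at hr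
        rw [hr, hfm]
      · simp only [subl, List.map_cons, if_neg hv, nzIdx,
          if_pos (show v - m ≠ 0 by omega), if_pos hv, List.filter_cons]
        rw [if_pos (by simp; omega)]
        simp only [subl] at hr
        rw [hr, hfm]

-- the comprehension in Source B, characterised through nzIdx
theorem itemsAux : ∀ (l : List Int), (∀ v ∈ l, 0 ≤ v) → ∀ (s : Int),
    ((PySem.List.enumerate l s).filter (fun p => decide (0 < p.2))).map (fun p => (p.2, p.1)) =
      (nzIdx l).map (fun i => (l.getD i 0, s + (i : Int)))
  | [], _, s => by simp [PySem.List.enumerate, nzIdx]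
  | v :: r, h0, s => by
    have hr := itemsAux r (fun w hw => h0 w (List.mem_cons_of_mem _ hw)) (s + 1)
    have hshift : ∀ (xs : List Nat),
        (xs.map (fun i => (r.getD i 0, (s + 1) + (i : Int)))) =
          ((xs.map (· + 1)).map (fun i => ((v :: r).getD i 0, s + (i : Int)))) := by
      intro xs
      rw [List.map_map]
      apply List.map_congr_left
      intro a _
      simp only [Function.comp_apply, List.getD_cons_succ, Prod.mk.injEq]
      refine ⟨by trivial, by push_cast; ring⟩
    rw [PySem.List.enumerate_cons]
    by_cases hv : v = 0
    · subst hv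
      rw [List.filter_cons, if_neg (by simp)]
      simp only [nzIdx, if_neg (show ¬ ((0:Int) ≠ 0) by simp)]
      rw [hr, hshift]
    · have hpos : 0 < v := by
        have := h0 v (List.mem_cons_self ..); omega
      rw [List.filter_cons, if_pos (by simpa using hpos)]
      simp only [List.map_cons, nzIdx, if_pos hv]
      rw [hr, hshift]
      simp

theorem itemsChar (l : List Int) (h0 : ∀ v ∈ l, 0 ≤ v) :
    itemsOf l = (nzIdx l).map (fun i => (l.getD i 0, (i : Int))) := by
  have := itemsAux l h0 0
  simpa [itemsOf] using this

theorem getD_subl_mem (m : Int) (l : List Int) {i : Nat} (h : i ∈ nzIdx l) :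
    (subl m l).getD i 0 = l.getD i 0 - m := by
  have hlt := mem_nzIdx_lt l h
  have hne := getD_nzIdx_ne l h
  rw [List.getD_eq_getElem?_getD, List.getElem?_eq_getElem hlt, Option.getD_some] at hne
  rw [List.getD_eq_getElem?_getD, List.getD_eq_getElem?_getD, subl, List.getElem?_map,
    List.getElem?_eq_getElem hlt]
  simp only [Option.map_some, Option.getD_some]
  rw [if_neg hne]

-- j full passes of A at once (no entry crosses zero during them)
theorem multi (j : Nat) (l : List Int) (k : Int) (fuel : Nat)
    (h0 : ∀ v ∈ l, 0 ≤ v) (hm : ∀ v ∈ l, v ≠ 0 → (j : Int) ≤ v)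
    (hk : (j : Int) * cnz l < k) (hs : k ≤ l.sum) (hf : j ≤ fuel) :
    aLoop fuel l k 0 = aLoop (fuel - j) (subl j l) (k - j * cnz l) 0 := by
  induction j with
  | zero => simp [subl_zero]
  | succ j ih =>
    have hC : (0 : Int) ≤ (cnz l : Int) := by positivity
    have hk' : ((j : Int) + 1) * (cnz l : Int) < k := by push_cast at hk; exact hk
    have hexp : ((j : Int) + 1) * (cnz l : Int) = (j : Int) * cnz l + cnz l := by ring
    have hmj : ∀ v ∈ l, v ≠ 0 → (j : Int) ≤ v := by
      intro v hv hvne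
      have := hm v hv hvne; push_cast at this; omega
    have hstrict : ∀ v ∈ l, v ≠ 0 → (j : Int) < v := by
      intro v hv hvne
      have := hm v hv hvne; push_cast at this; omega
    have hm1 : ∀ v ∈ l, v ≠ 0 → (j : Int) + 1 ≤ v := by
      intro v hv hvne
      have := hm v hv hvne; push_cast at this; omega
    have hkj : (j : Int) * cnz l < k := by omega
    rw [ih hmj hkj (by omega)]
    have hcsub : cnz (subl (j : Int) l) = cnz l := cnz_subl _ l hstrict
    have hsum : (subl (j : Int) l).sum = l.sum - (j : Int) * cnz l := sum_subl _ l
    rw [show fuel - j = (fuel - (j + 1)) + 1 by omega]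
    rw [aLoop]
    rw [if_neg (show ¬ (k - (j : Int) * cnz l = 0) by omega)]
    rw [if_neg (show ¬ ((subl (j : Int) l).sum < k - (j : Int) * cnz l) by rw [hsum]; omega)]
    rw [pass_inl _ _ _ _ (by rw [hcsub]; omega)]
    rw [map_dec_subl _ _ hm1, hcsub]
    have h1 : ((j : Nat) + 1 : Nat) = ((j : Int) + 1).toNat := by omega
    have h2 : k - (j : Int) * cnz l - (cnz l : Int) = k - ((j + 1 : Nat) : Int) * cnz l := by
      push_cast; ring
    rw [h2]
    norm_num

-- the crux: A's loop equals B's loop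
theorem main_loop (K : Nat) : ∀ (l : List Int) (k : Int) (fuelA fuelB : Nat),
    (∀ v ∈ l, 0 ≤ v) → 1 ≤ k → k ≤ l.sum →
    k.toNat ≤ fuelA → k.toNat ≤ fuelB → k.toNat ≤ K →
    aLoop fuelA l k 0 = bLoop fuelB (l.length : Int) (itemsOf l) k := by
  induction K with
  | zero => intro l k fuelA fuelB h0 hk1 hks hfA hfB hK; omega
  | succ K ih =>
    intro l k fuelA fuelB h0 hk1 hks hfA hfB hK
    have hCpos : 1 ≤ cnz l := cnz_pos_of_sum l h0 (by omega)
    have hCposI : (1 : Int) ≤ (cnz l : Int) := by exact_mod_cast hCpos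
    have hchar := itemsChar l h0
    have hlenItems : (itemsOf l).length = cnz l := by
      rw [hchar, List.length_map, length_nzIdx]
    obtain ⟨fB, rfl⟩ : ∃ fB, fuelB = fB + 1 := ⟨fuelB - 1, by omega⟩
    have hvals : (itemsOf l).map Prod.fst = (nzIdx l).map (fun i => l.getD i 0) := by
      rw [hchar, List.map_map]; rfl
    have hvne : (itemsOf l).map Prod.fst ≠ [] := by
      intro hnil
      have := congrArg List.length hnil
      rw [List.length_map, hlenItems] at this
      simp at this; omega
    obtain ⟨m, hmin⟩ : ∃ m, PySem.List.min? ((itemsOf l).map Prod.fst) (fun v => v) = some m := by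
      obtain ⟨x, t, hx⟩ := List.exists_cons_of_ne_nil hvne
      exact ⟨_, by rw [hx, PySem.List.min?_id_cons]⟩
    have hmmem := PySem.List.min?_mem hmin
    have hmismin := PySem.List.min?_isMin hmin
    have hm1 : 1 ≤ m := by
      rw [hvals] at hmmem
      obtain ⟨i, hi, hieq⟩ := List.mem_map.mp hmmem
      have hne := getD_nzIdx_ne l hi
      have hlt := mem_nzIdx_lt l hi
      have hmem' : l.getD i 0 ∈ l := by
        rw [List.getD_eq_getElem?_getD, List.getElem?_eq_getElem hlt, Option.getD_some]
        exact List.getElem_mem _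
      have := h0 _ hmem'
      omega
    have hmle : ∀ v ∈ l, v ≠ 0 → m ≤ v := by
      intro v hv hvne'
      have hvmem : v ∈ (itemsOf l).map Prod.fst := by
        rw [hvals]; exact mem_vals l v hv hvne'
      exact hmismin v hvmem
    -- one unfolding of B's loop
    have hB : bLoop (fB + 1) (l.length : Int) (itemsOf l) k
        = if m * (cnz l : Int) < k
          then bLoop fB (l.length : Int)
            (((itemsOf l).filter (fun p => decide (m < p.1))).map (fun p => (p.1 - m, p.2)))
            (k - m * cnz l)
          else PySem.Int.mod
            (((itemsOf l).getD (PySem.Int.mod (k - 1) (cnz l : Int)).toNat (0, 0)).2 + 1)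
            (l.length : Int) + 1 := by
      rw [bLoop]
      simp only [hmin, hlenItems]
    rw [hB]
    by_cases hbr : m * (cnz l : Int) < k
    · -- B skips a whole level: m passes of A
      rw [if_pos hbr]
      have hmt : ((m.toNat : Nat) : Int) = m := Int.toNat_of_nonneg (by omega)
      have hPm : m ≤ m * (cnz l : Int) := le_mul_of_one_le_right (by omega) hCposI
      have hmk : m < k := lt_of_le_of_lt hPm hbr
      have hmml : ∀ v ∈ l, v ≠ 0 → ((m.toNat : Nat) : Int) ≤ v := by
        intro v hv hvne'; rw [hmt]; exact hmle v hv hvne'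
      have hkm : ((m.toNat : Nat) : Int) * (cnz l : Int) < k := by rw [hmt]; exact hbr
      rw [multi m.toNat l k fuelA h0 hmml hkm hks (by omega)]
      rw [hmt]
      have h0' : ∀ v ∈ subl m l, 0 ≤ v := nonneg_subl m l h0 hmle
      have hsum' : (subl m l).sum = l.sum - m * cnz l := sum_subl m l
      have hitems' : itemsOf (subl m l)
          = ((itemsOf l).filter (fun p => decide (m < p.1))).map (fun p => (p.1 - m, p.2)) := by
        rw [itemsChar _ h0', nzIdx_subl_filter m l h0 hmle]
        rw [hchar, List.filter_map, List.map_map]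
        apply List.map_congr_left
        intro i hi
        have hinz : i ∈ nzIdx l := List.mem_of_mem_filter hi
        simp only [Function.comp_apply, Prod.mk.injEq]
        exact ⟨getD_subl_mem m l hinz, trivial⟩
      have := ih (subl m l) (k - m * cnz l) (fuelA - m.toNat) fB h0'
        (by omega) (by rw [hsum']; omega) (by omega) (by omega) (by omega)
      rw [length_subl, hitems'] at this
      exact this
    · -- the k-th bite falls inside this level
      rw [if_neg hbr]
      have hC0 : 0 < cnz l := hCpos
      have hKk : ((k.toNat : Nat) : Int) = k := Int.toNat_of_nonneg (by omega)
      have hKM : k.toNat ≤ m.toNat * cnz l := by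
        have : k ≤ m * (cnz l : Int) := by omega
        have h2 : ((m.toNat * cnz l : Nat) : Int) = m * (cnz l : Int) := by
          push_cast; rw [Int.toNat_of_nonneg (by omega : (0:Int) ≤ m)]
        omega
      have hjlt : (k.toNat - 1) / cnz l < m.toNat :=
        (Nat.div_lt_iff_lt_mul hC0).mpr (by omega)
      have hdm := Nat.div_add_mod (k.toNat - 1) (cnz l)
      have hmodlt : (k.toNat - 1) % cnz l < cnz l := Nat.mod_lt _ hC0
      have hjCn : ((k.toNat - 1) / cnz l) * cnz l ≤ k.toNat - 1 := Nat.div_mul_le_self _ _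
      have hjle' : (k.toNat - 1) / cnz l ≤ k.toNat - 1 := Nat.div_le_self _ _
      have hcastP : ((((k.toNat - 1) / cnz l) * cnz l : Nat) : Int)
          = (((k.toNat - 1) / cnz l : Nat) : Int) * (cnz l : Int) := by push_cast; ring
      have hjC : (((k.toNat - 1) / cnz l : Nat) : Int) * (cnz l : Int) < k := by
        rw [← hcastP]
        omega
      have hjstrict : ∀ v ∈ l, v ≠ 0 → (((k.toNat - 1) / cnz l : Nat) : Int) < v := by
        intro v hv hvne'
        have := hmle v hv hvne'
        have hmtc : ((m.toNat : Nat) : Int) = m := Int.toNat_of_nonneg (by omega)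
        omega
      have hjle : ∀ v ∈ l, v ≠ 0 → (((k.toNat - 1) / cnz l : Nat) : Int) ≤ v := by
        intro v hv hvne'; exact le_of_lt (hjstrict v hv hvne')
      rw [multi ((k.toNat - 1) / cnz l) l k fuelA h0 hjle hjC hks (by omega)]
      rw [show fuelA - (k.toNat - 1) / cnz l = (fuelA - ((k.toNat - 1) / cnz l + 1)) + 1 by omega]
      rw [aLoop]
      rw [if_neg (show ¬ (k - (((k.toNat - 1) / cnz l : Nat) : Int) * (cnz l : Int) = 0) by
        rw [← hcastP]; omega)]
      rw [if_neg (show ¬ ((subl (((k.toNat - 1) / cnz l : Nat) : Int) l).sum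
          < k - (((k.toNat - 1) / cnz l : Nat) : Int) * (cnz l : Int)) by
        rw [sum_subl]; omega)]
      have hcnzsub := cnz_subl (((k.toNat - 1) / cnz l : Nat) : Int) l hjstrict
      rw [pass_inr _ _ _ _
        (by rw [← hcastP]; omega)
        (by rw [hcnzsub, ← hcastP]
            have hcomm : ((cnz l : Nat) : Int) * (((k.toNat - 1) / cnz l : Nat) : Int)
              = ((((k.toNat - 1) / cnz l) * cnz l : Nat) : Int) := by push_cast; ring
            omega)]
      rw [nzIdx_subl _ l hjstrict, length_subl]
      have hPeq : ((k.toNat - 1) / cnz l) * cnz l = cnz l * ((k.toNat - 1) / cnz l) :=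
        Nat.mul_comm _ _
      have hidx : (k - (((k.toNat - 1) / cnz l : Nat) : Int) * (cnz l : Int)).toNat - 1
          = (k.toNat - 1) % cnz l := by
        rw [← hcastP]; omega
      rw [hidx]
      -- B's index computation
      have hmodB : (PySem.Int.mod (k - 1) ((cnz l : Nat) : Int)).toNat = (k.toNat - 1) % cnz l := by
        rw [PySem.Int.mod_eq_emod_of_pos (by exact_mod_cast hC0)]
        have h1 : k - 1 = (((k.toNat - 1 : Nat)) : Int) := by omega
        rw [h1, ← Int.natCast_mod]
        omega
      rw [hmodB]
      have hQlt : (k.toNat - 1) % cnz l < (nzIdx l).length := by rw [length_nzIdx]; omega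
      have hgetB : (itemsOf l).getD ((k.toNat - 1) % cnz l) (0, 0)
          = (l.getD ((nzIdx l)[(k.toNat - 1) % cnz l] : Nat) 0,
             (((nzIdx l)[(k.toNat - 1) % cnz l] : Nat) : Int)) := by
        rw [hchar, List.getD_eq_getElem?_getD, List.getElem?_map,
          List.getElem?_eq_getElem hQlt]
        simp
      rw [hgetB]
      have hgetDnz : (nzIdx l).getD ((k.toNat - 1) % cnz l) 0
          = (nzIdx l)[(k.toNat - 1) % cnz l] := by
        rw [List.getD_eq_getElem?_getD, List.getElem?_eq_getElem hQlt, Option.getD_some]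
      rw [hgetDnz]
      -- compare the two answer formulas
      have hJmem : (nzIdx l)[(k.toNat - 1) % cnz l] ∈ nzIdx l := List.getElem_mem _
      have hJlt : (nzIdx l)[(k.toNat - 1) % cnz l] < l.length := mem_nzIdx_lt l hJmem
      have hn1 : 1 ≤ l.length := by omega
      by_cases hJ : (nzIdx l)[(k.toNat - 1) % cnz l] = l.length - 1
      · have hcast2 : (((nzIdx l)[(k.toNat - 1) % cnz l] : Nat) : Int) + 1 = (l.length : Int) := by
          omega
        rw [mkAns]
        simp only [Nat.zero_add]
        rw [if_pos hJ, hcast2, PySem.Int.mod_eq_emod_of_pos (by exact_mod_cast hn1),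
          Int.emod_self]
        norm_num
      · rw [mkAns]
        simp only [Nat.zero_add]
        rw [if_neg hJ]
        have hlt2 : (((nzIdx l)[(k.toNat - 1) % cnz l] : Nat) : Int) + 1 < (l.length : Int) := by
          omega
        rw [PySem.Int.mod_eq_emod_of_pos (by exact_mod_cast hn1),
          Int.emod_eq_of_lt (by omega) hlt2]
        ring

-- ===== VERDICT (by name: the statement is the Claim_ definition above) =====
theorem solution_spec : Claim_equal_solution := by
  intro food_times k _hdom hpre
  obtain ⟨hk0, hnn⟩ := hpre
  unfold Spec_solution solution solution_alt
  by_cases hk : k = 0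
  · subst hk
    simp [aLoop]
  · have hk1 : 1 ≤ k := by omega
    by_cases hs : food_times.sum < k
    · rw [show k.toNat + 1 = (k.toNat) + 1 from rfl, aLoop, if_neg hk, if_pos hs]
      simp [hk, hs]
    · rw [main_loop k.toNat food_times k (k.toNat + 1) k.toNat hnn hk1 (by omega)
        (by omega) (le_refl _) (le_refl _)]
      simp [hk, hs]
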